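-- pv_equiv track=rewrite | github.com/Kopsicos/Avalanche | Avalanche_AlexanderKorol/Avalanche.py | crop_text
-- ===== SOURCE A (Python) =====
-- def crop_text(text, letters):
-- 	display_text = []
-- 	displayed_letters = 0
-- 	for line in text:
-- 		if displayed_letters >= letters:
-- 			break
-- 		elif len(line) + displayed_letters <= letters:
-- 			display_text.append(line)
-- 			displayed_letters += len(line)
-- 		elif displayed_letters < letters:
-- 			display_text.append(line[:(letters - displayed_letters)])
-- 			break
-- 	return display_text
-- ===== SOURCE B (Python) =====
-- def crop_text(text, letters):
--     # prefix[i] = total letters of text[:i]; then scan the table for the cutoff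
--     prefix = [0]
--     for line in text:
--         prefix.append(prefix[-1] + len(line))
--     out = []
--     for line, before, after in zip(text, prefix, prefix[1:]):
--         if before >= letters:
--             break
--         if after <= letters:
--             out.append(line)
--         else:
--             out.append(line[: letters - before])
--             break
--     return out
-- ===== Notes on version B (the rewrite author's own statement) =====
-- stated objective: alternative
-- what changed: B precomputes a prefix-sum table of line lengths and then scans that table for the cutoff, instead of A's single fused accumulate-and-break loop with running state and an unreachable third branch.
import Mathlib
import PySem

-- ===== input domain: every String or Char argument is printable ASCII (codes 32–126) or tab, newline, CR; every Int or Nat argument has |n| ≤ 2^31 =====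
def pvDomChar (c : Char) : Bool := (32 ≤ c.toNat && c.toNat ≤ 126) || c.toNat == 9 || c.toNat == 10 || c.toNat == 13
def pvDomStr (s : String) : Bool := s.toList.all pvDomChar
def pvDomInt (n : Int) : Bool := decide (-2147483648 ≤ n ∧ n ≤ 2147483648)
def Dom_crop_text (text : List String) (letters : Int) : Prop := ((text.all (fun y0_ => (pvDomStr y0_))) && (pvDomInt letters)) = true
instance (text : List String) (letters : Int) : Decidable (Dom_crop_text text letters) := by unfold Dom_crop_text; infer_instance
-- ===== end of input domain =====

-- B replaces A's fused accumulate-and-break loop by a prefix-sum table plus a cutoff scan; objective: alternative decomposition.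

-- ===== PORT A =====
-- the for-loop of A: state = (display_text, displayed_letters); break returns the accumulator
def cropA_loop (letters : Int) : List String → List String → Int → List String
  | [], display, _ => display
  | line :: rest, display, displayed =>
    if displayed ≥ letters then display
    else if PySem.Str.len line + displayed ≤ letters then
      cropA_loop letters rest (display ++ [line]) (displayed + PySem.Str.len line)
    else if displayed < letters then
      display ++ [PySem.Str.slice line none (some (letters - displayed))]
    else  -- no branch taken: continue
      cropA_loop letters rest display displayed

def crop_text (text : List String) (letters : Int) : List String :=
  cropA_loop letters text [] 0

-- ===== PORT B =====
-- second pass of B: scan zip(text, prefix, prefix[1:]) for the cutoff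
def cropB_scan (letters : Int) : List (String × Int × Int) → List String
  | [] => []
  | (line, before, after) :: rest =>
    if before ≥ letters then []
    else if after ≤ letters then line :: cropB_scan letters rest
    else [PySem.Str.slice line none (some (letters - before))]

def crop_text_alt (text : List String) (letters : Int) : List String :=
  let pfx := text.foldl (fun ps line => ps ++ [(ps.getLast?.getD 0) + PySem.Str.len line]) [0]
  cropB_scan letters (text.zip (pfx.zip pfx.tail))

-- ===== PRECONDITION & SPEC =====
def Spec_crop_text (text : List String) (letters : Int) (out : List String) : Prop := out = crop_text_alt text letters
instance (text : List String) (letters : Int) (out : List String) : Decidable (Spec_crop_text text letters out) := by unfold Spec_crop_text; infer_instance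

-- ===== CLAIM (what is proved, stated in full; the proofs are below) =====
def Claim_equal_crop_text : Prop := ∀ (text : List String) (letters : Int), Dom_crop_text text letters → Spec_crop_text text letters (crop_text text letters)

-- ===== LEMMAS AND PROOFS =====

-- the mathematical prefix list: prefixFrom s text = [s, s+len t0, s+len t0+len t1, …]
def prefixFrom (s : Int) : List String → List Int
  | [] => [s]
  | line :: rest => s :: prefixFrom (s + PySem.Str.len line) rest

theorem prefixFrom_head (s : Int) (text : List String) :
    prefixFrom s text = s :: (prefixFrom s text).tail := by
  cases text <;> simp [prefixFrom]

theorem foldl_prefix (text : List String) (ps : List Int) (s : Int) :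
    text.foldl (fun ps line => ps ++ [(ps.getLast?.getD 0) + PySem.Str.len line]) (ps ++ [s])
      = ps ++ prefixFrom s text := by
  induction text generalizing ps s with
  | nil => simp [prefixFrom]
  | cons line rest ih =>
    simp only [List.foldl_cons, prefixFrom]
    have h : (ps ++ [s]).getLast?.getD 0 = s := by simp
    rw [h, List.append_assoc]
    have := ih (ps ++ [s]) (s + PySem.Str.len line)
    simpa using this

theorem cropA_acc (letters : Int) (text : List String) (d : List String) (s : Int) :
    cropA_loop letters text d s = d ++ cropA_loop letters text [] s := by
  induction text generalizing d s with
  | nil => simp [cropA_loop]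
  | cons line rest ih =>
    simp only [cropA_loop]
    split_ifs with h1 h2 h3
    · simp
    · rw [ih (d ++ [line]), ih ([] ++ [line])]; simp
    · simp
    · exact ih d s

theorem scan_eq_loop (letters : Int) (text : List String) (s : Int) :
    cropB_scan letters (text.zip ((prefixFrom s text).zip (prefixFrom s text).tail))
      = cropA_loop letters text [] s := by
  induction text generalizing s with
  | nil => simp [prefixFrom, cropB_scan, cropA_loop]
  | cons line rest ih =>
    simp only [prefixFrom]
    rw [prefixFrom_head (s + PySem.Str.len line) rest]
    simp only [List.tail_cons, List.zip_cons_cons, cropB_scan, cropA_loop]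
    rw [← prefixFrom_head]
    by_cases h1 : s ≥ letters
    · simp [h1]
    · by_cases h2 : s + PySem.Str.len line ≤ letters
      · have h2' : PySem.Str.len line + s ≤ letters := by omega
        rw [if_neg h1, if_pos h2, if_neg h1, if_pos h2',
          cropA_acc letters rest ([] ++ [line]) (s + PySem.Str.len line), ih]
        simp
      · have h2' : ¬ PySem.Str.len line + s ≤ letters := by omega
        have h3 : s < letters := by omega
        rw [if_neg h1, if_neg h2, if_neg h1, if_neg h2', if_pos h3]
        simp

-- ===== VERDICT (by name: the statement is the Claim_ definition above) =====
theorem crop_text_spec : Claim_equal_crop_text := by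
  intro text letters _
  unfold Spec_crop_text crop_text crop_text_alt
  have h := foldl_prefix text [] 0
  simp only [List.nil_append] at h
  rw [h, scan_eq_loop]
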